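-- pv_equiv track=rewrite | github.com/f4mous99/mmr-lol | lol.py | get_rank_from_mmr
-- ===== SOURCE A (Python) =====
-- def get_rank_from_mmr(mmr):
--     ranges = [
--         (2800, "CHALLENGER", ""),
--         (2600, "GRANDMASTER", ""),
--         (2400, "MASTER", ""),
--         (2200, "DIAMOND", 1),
--         (2100, "DIAMOND", 2),
--         (2000, "DIAMOND", 3),
--         (1900, "DIAMOND", 4),
--         (1800, "EMERALD", 1),
--         (1700, "EMERALD", 2),
--         (1600, "EMERALD", 3),
--         (1500, "EMERALD", 4),
--         (1400, "PLATINUM", 1),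
--         (1300, "PLATINUM", 2),
--         (1200, "PLATINUM", 3),
--         (1100, "PLATINUM", 4),
--         (1000, "GOLD", 1),
--         (900, "GOLD", 2),
--         (800, "GOLD", 3),
--         (700, "GOLD", 4),
--         (600, "SILVER", 1),
--         (500, "SILVER", 2),
--         (400, "SILVER", 3),
--         (300, "SILVER", 4),
--         (200, "BRONZE", 1),
--         (100, "BRONZE", 2),
--         (0, "IRON", 1)
--     ]
--
--     for limit, tier, division in ranges:
--         if mmr >= limit:
--             return f"{tier.upper()} {division}" if division else f"{tier.upper()}"
--     return "IRON"
-- ===== SOURCE B (Python) =====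
-- _RANK_TABLE = (
--     ["IRON 1", "BRONZE 2", "BRONZE 1"]
--     + [f"{tier} {div}" for tier in ("SILVER", "GOLD", "PLATINUM", "EMERALD")
--        for div in (4, 3, 2, 1)]
--     + ["DIAMOND 4", "DIAMOND 3", "DIAMOND 2", "DIAMOND 1", "DIAMOND 1"]
--     + ["MASTER", "MASTER", "GRANDMASTER", "GRANDMASTER"]
-- )
--
-- def get_rank_from_mmr(mmr):
--     if mmr >= 2800:
--         return "CHALLENGER"
--     if mmr < 0:
--         return "IRON"
--     return _RANK_TABLE[mmr // 100]
-- ===== Notes on version B (the rewrite author's own statement) =====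
-- stated objective: idiomatic
-- what changed: Replaces A's linear first-match scan over a long list of threshold tuples with a precomputed bucket table indexed directly by mmr // 100 after two boundary guards.
import Mathlib
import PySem

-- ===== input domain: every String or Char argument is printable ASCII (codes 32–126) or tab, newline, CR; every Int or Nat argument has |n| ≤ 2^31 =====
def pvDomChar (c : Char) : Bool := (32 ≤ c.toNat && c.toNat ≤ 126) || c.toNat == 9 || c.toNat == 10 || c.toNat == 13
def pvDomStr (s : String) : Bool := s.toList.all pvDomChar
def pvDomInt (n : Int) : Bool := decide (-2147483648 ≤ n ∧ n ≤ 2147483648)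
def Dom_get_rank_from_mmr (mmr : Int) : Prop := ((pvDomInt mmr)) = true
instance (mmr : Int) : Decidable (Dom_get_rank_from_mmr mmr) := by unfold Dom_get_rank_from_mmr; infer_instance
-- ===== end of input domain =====

-- B replaces A's linear first-match threshold scan by a direct bucket-table lookup indexed by mmr // 100 (idiomatic closed-form dispatch).

-- ===== PORT A =====
-- the `ranges` list: division "" (falsy) is ported as none, an int division as some d
def pyRanges : List (Int × String × Option Int) :=
  [(2800, "CHALLENGER", none), (2600, "GRANDMASTER", none), (2400, "MASTER", none),
   (2200, "DIAMOND", some 1), (2100, "DIAMOND", some 2), (2000, "DIAMOND", some 3), (1900, "DIAMOND", some 4),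
   (1800, "EMERALD", some 1), (1700, "EMERALD", some 2), (1600, "EMERALD", some 3), (1500, "EMERALD", some 4),
   (1400, "PLATINUM", some 1), (1300, "PLATINUM", some 2), (1200, "PLATINUM", some 3), (1100, "PLATINUM", some 4),
   (1000, "GOLD", some 1), (900, "GOLD", some 2), (800, "GOLD", some 3), (700, "GOLD", some 4),
   (600, "SILVER", some 1), (500, "SILVER", some 2), (400, "SILVER", some 3), (300, "SILVER", some 4),
   (200, "BRONZE", some 1), (100, "BRONZE", some 2), (0, "IRON", some 1)]

-- the `for limit, tier, division in ranges` loop with its early return; fall-through returns "IRON"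
def scanRanges (mmr : Int) : List (Int × String × Option Int) → String
  | [] => "IRON"
  | (limit, tier, division) :: rest =>
    if mmr ≥ limit then
      match division with
      | some d => PySem.Str.upper tier ++ " " ++ PySem.Int.toStr d
      | none => PySem.Str.upper tier
    else scanRanges mmr rest

def get_rank_from_mmr (mmr : Int) : String := scanRanges mmr pyRanges

-- ===== PORT B =====
-- _RANK_TABLE, built exactly as Source B builds it (literals ++ a comprehension ++ literals)
def rankTable : List String :=
  ["IRON 1", "BRONZE 2", "BRONZE 1"]
  ++ (["SILVER", "GOLD", "PLATINUM", "EMERALD"].flatMap fun tier =>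
        ([4, 3, 2, 1] : List Int).map fun d => tier ++ " " ++ PySem.Int.toStr d)
  ++ ["DIAMOND 4", "DIAMOND 3", "DIAMOND 2", "DIAMOND 1", "DIAMOND 1"]
  ++ ["MASTER", "MASTER", "GRANDMASTER", "GRANDMASTER"]

def get_rank_from_mmr_alt (mmr : Int) : String :=
  if mmr ≥ 2800 then "CHALLENGER"
  else if mmr < 0 then "IRON"
  else (PySem.List.pyGet? rankTable (PySem.Int.floordiv mmr 100)).getD ""
       -- index is provably in range here (0 ≤ mmr // 100 < 28); .getD "" only totalises

-- ===== PRECONDITION & SPEC =====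
def Spec_get_rank_from_mmr (mmr : Int) (out : String) : Prop := out = get_rank_from_mmr_alt mmr
instance (mmr : Int) (out : String) : Decidable (Spec_get_rank_from_mmr mmr out) := by unfold Spec_get_rank_from_mmr; infer_instance

-- ===== CLAIM (what is proved, stated in full; the proofs are below) =====
def Claim_equal_get_rank_from_mmr : Prop := ∀ (mmr : Int), Dom_get_rank_from_mmr mmr → Spec_get_rank_from_mmr mmr (get_rank_from_mmr mmr)

-- ===== LEMMAS AND PROOFS =====

-- ===== VERDICT (by name: the statement is the Claim_ definition above) =====
set_option maxHeartbeats 1600000 in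
theorem get_rank_from_mmr_spec : Claim_equal_get_rank_from_mmr := by
  intro mmr _
  unfold Spec_get_rank_from_mmr get_rank_from_mmr get_rank_from_mmr_alt
  by_cases h1 : mmr ≥ 2800
  · rw [if_pos h1]
    simp only [pyRanges, scanRanges]
    rw [if_pos h1]
    decide
  · by_cases h2 : mmr < 0
    · rw [if_neg h1, if_pos h2]
      simp only [pyRanges, scanRanges]
      repeat rw [if_neg (by omega)]
    · rw [if_neg h1, if_neg h2,
        PySem.Int.floordiv_eq_ediv_of_pos (by omega : (0:Int) < 100)]
      obtain ⟨k, hk⟩ : ∃ k, mmr / 100 = k := ⟨_, rfl⟩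
      rw [hk]
      have hk0 : 0 ≤ k := by omega
      have hk1 : k < 28 := by omega
      simp only [pyRanges, scanRanges]
      interval_cases k <;>
        · repeat first | rw [if_pos (by omega)] | rw [if_neg (by omega)]
          decide
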